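-- pv_equiv track=rewrite | github.com/msamuel26/programming | latihan_himpunan.py | hitung
-- ===== SOURCE A (Python) =====
-- def calculate(set_input, dict):
--     output = 0
--     for data in set_input:
--         for key in dict:
--             if data == key:
--                 output += dict[key]
--     return output
--
-- def hitung(list_a, list_b, a_dict):
--     reversed_dict = dict((value, key) for key, value in a_dict.items())
--
--     a = set(list_a).intersection(set(list_b))
--     b = set(list_a).difference(set(list_b))
--     c = set(list_b).difference(set(list_a))
--
--     numeric_intersec = calculate(a, reversed_dict)
--     numeric_a_diff_b = calculate(b, reversed_dict)
--     numeric_b_diff_a = calculate(c, reversed_dict)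
--
--     jumlah_a = numeric_intersec + numeric_a_diff_b
--     jumlah_b = numeric_intersec + numeric_b_diff_a
--
--     sisa = sum(a_dict) - numeric_intersec - numeric_a_diff_b - numeric_b_diff_a
--     return [jumlah_a, jumlah_b, numeric_intersec,sisa]
-- ===== SOURCE B (Python) =====
-- def hitung(list_a, list_b, a_dict):
--     R = {value: key for key, value in a_dict.items()}
--     sa, sb = set(list_a), set(list_b)
--     ja = sum(R[e] for e in sa if e in R)
--     jb = sum(R[e] for e in sb if e in R)
--     ni = sum(R[e] for e in (sa & sb) if e in R)
--     return [ja, jb, ni, sum(a_dict) - ja - jb + ni]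
-- ===== Notes on version B (the rewrite author's own statement) =====
-- stated objective: faster
-- what changed: B computes each list's total directly as one lookup-sum over its element set (plus one over the intersection) and derives the remainder arithmetically, instead of building two difference sets and summing intersection plus differences with an inner linear scan over all dict keys per element.
import Mathlib
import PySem

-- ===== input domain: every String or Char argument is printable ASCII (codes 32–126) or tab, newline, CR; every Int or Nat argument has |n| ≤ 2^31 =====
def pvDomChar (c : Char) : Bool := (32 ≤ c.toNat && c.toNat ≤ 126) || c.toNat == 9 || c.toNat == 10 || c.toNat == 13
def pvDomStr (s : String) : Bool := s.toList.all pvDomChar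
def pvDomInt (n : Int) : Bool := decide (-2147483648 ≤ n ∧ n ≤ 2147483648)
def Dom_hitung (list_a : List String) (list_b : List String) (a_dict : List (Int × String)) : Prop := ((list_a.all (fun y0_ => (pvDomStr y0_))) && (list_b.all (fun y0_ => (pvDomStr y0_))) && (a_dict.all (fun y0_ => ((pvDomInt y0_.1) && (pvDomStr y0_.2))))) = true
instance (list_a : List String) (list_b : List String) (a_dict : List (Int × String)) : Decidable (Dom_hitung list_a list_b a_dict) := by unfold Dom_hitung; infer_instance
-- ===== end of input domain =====

-- B replaces A's intersection-plus-two-differences with direct per-set lookup-sums and an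
-- arithmetic remainder, dropping A's per-element scan over all dict keys (objective: faster,
-- measured).


-- ===== PORT A =====
-- helper 'calculate': for data in set_input: for key in dict: if data == key: output += dict[key]
def pvCalculate (set_input : List String) (d : PySem.Dict String Int) : Int :=
  set_input.foldl (fun output data =>
    d.keys.foldl (fun output key =>
      if data == key then output + d.getD key 0 else output) output) 0

def hitung (list_a : List String) (list_b : List String) (a_dict : List (Int × String)) : List Int :=
  let adict := PySem.Dict.ofList a_dict      -- the Python parameter IS a dict built from these pairs
  let reversed_dict := adict.items.foldl (fun d kv => d.insert kv.2 kv.1) PySem.Dict.empty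
  let a := PySem.Set.inter (PySem.Set.ofList list_a) (PySem.Set.ofList list_b)
  let b := PySem.Set.diff (PySem.Set.ofList list_a) (PySem.Set.ofList list_b)
  let c := PySem.Set.diff (PySem.Set.ofList list_b) (PySem.Set.ofList list_a)
  let numeric_intersec := pvCalculate a reversed_dict
  let numeric_a_diff_b := pvCalculate b reversed_dict
  let numeric_b_diff_a := pvCalculate c reversed_dict
  let jumlah_a := numeric_intersec + numeric_a_diff_b
  let jumlah_b := numeric_intersec + numeric_b_diff_a
  let sisa := adict.keys.sum - numeric_intersec - numeric_a_diff_b - numeric_b_diff_a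
  [jumlah_a, jumlah_b, numeric_intersec, sisa]

-- ===== PORT B =====
-- sum(R[e] for e in s if e in R)
def pvLookSum (s : PySem.Set String) (r : PySem.Dict String Int) : Int :=
  s.foldl (fun acc e => if r.contains e then acc + r.getD e 0 else acc) 0

def hitung_alt (list_a : List String) (list_b : List String) (a_dict : List (Int × String)) : List Int :=
  let adict := PySem.Dict.ofList a_dict
  let r := adict.items.foldl (fun d kv => d.insert kv.2 kv.1) PySem.Dict.empty
  let sa := PySem.Set.ofList list_a
  let sb := PySem.Set.ofList list_b
  let ja := pvLookSum sa r
  let jb := pvLookSum sb r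
  let ni := pvLookSum (PySem.Set.inter sa sb) r
  [ja, jb, ni, adict.keys.sum - ja - jb + ni]

-- ===== PRECONDITION & SPEC =====
def Spec_hitung (list_a : List String) (list_b : List String) (a_dict : List (Int × String)) (out : List Int) : Prop := out = hitung_alt list_a list_b a_dict
instance (list_a : List String) (list_b : List String) (a_dict : List (Int × String)) (out : List Int) : Decidable (Spec_hitung list_a list_b a_dict out) := by unfold Spec_hitung; infer_instance

-- ===== CLAIM (what is proved, stated in full; the proofs are below) =====
def Claim_equal_hitung : Prop := ∀ (list_a : List String) (list_b : List String) (a_dict : List (Int × String)), Dom_hitung list_a list_b a_dict → Spec_hitung list_a list_b a_dict (hitung list_a list_b a_dict)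

-- ===== LEMMAS AND PROOFS =====
-- inner key-scan of A's calculate = one lookup, for nodup keys
lemma foldl_scan_eq (ks : List String) (data : String) (v : String → Int) (acc : Int)
    (h : ks.Nodup) :
    ks.foldl (fun o k => if data == k then o + v k else o) acc
      = acc + (if data ∈ ks then v data else 0) := by
  induction ks generalizing acc with
  | nil => simp
  | cons k ks ih =>
    simp only [List.nodup_cons] at h
    by_cases hk : data = k
    · subst hk
      simp only [List.foldl_cons, beq_self_eq_true]
      rw [ih _ h.2]
      simp [h.1]
    · have : (data == k) = false := by simp [hk]
      simp only [List.foldl_cons, this, Bool.false_eq_true, if_false]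
      rw [ih _ h.2]
      simp [hk]

-- both summation loops compute the same mapped sum
lemma pvCalculate_eq_sum (s : List String) (r : PySem.Dict String Int) (h : r.keys.Nodup) :
    pvCalculate s r = (s.map (fun e => if e ∈ r.keys then r.getD e 0 else 0)).sum := by
  unfold pvCalculate
  have : ∀ (acc : Int) (data : String),
      r.keys.foldl (fun o k => if data == k then o + r.getD k 0 else o) acc
        = acc + (if data ∈ r.keys then r.getD data 0 else 0) := by
    intro acc data
    rw [foldl_scan_eq r.keys data (fun k => r.getD k 0) acc h]
  have hfun : (fun (output : Int) data => r.keys.foldl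
          (fun o k => if data == k then o + r.getD k 0 else o) output)
      = (fun (output : Int) data => output + (if data ∈ r.keys then r.getD data 0 else 0)) := by
    funext o x; exact this o x
  rw [hfun, PySem.List.foldl_add]
  simp

lemma pvLookSum_eq_sum (s : PySem.Set String) (r : PySem.Dict String Int) :
    pvLookSum s r = (s.map (fun e => if e ∈ r.keys then r.getD e 0 else 0)).sum := by
  unfold pvLookSum
  have : ∀ (acc : Int) (e : String),
      (if r.contains e then acc + r.getD e 0 else acc)
        = acc + (if e ∈ r.keys then r.getD e 0 else 0) := by
    intro acc e
    rw [PySem.Dict.contains_eq_decide_mem_keys]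
    split_ifs with h1 <;> simp_all
  have hfun : (fun (acc : Int) e => if r.contains e then acc + r.getD e 0 else acc)
      = (fun (acc : Int) e => acc + (if e ∈ r.keys then r.getD e 0 else 0)) := by
    funext a x; exact this a x
  rw [hfun, PySem.List.foldl_add]
  simp

-- sum over a list = sum over its p-filter + sum over its ¬p-filter
lemma sum_filter_split (l : List String) (p : String → Bool) (g : String → Int) :
    (l.map g).sum = ((l.filter p).map g).sum + ((l.filter (fun x => !p x)).map g).sum := by
  induction l with
  | nil => simp
  | cons x l ih =>
    by_cases hx : p x <;> simp [hx, ih] <;> ring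

-- sums over two nodup lists with the same members agree
lemma sum_perm_of_mem_iff (l₁ l₂ : List String) (g : String → Int)
    (h₁ : l₁.Nodup) (h₂ : l₂.Nodup) (hm : ∀ x, x ∈ l₁ ↔ x ∈ l₂) :
    (l₁.map g).sum = (l₂.map g).sum := by
  exact List.Perm.sum_eq (List.Perm.map g ((List.perm_ext_iff_of_nodup h₁ h₂).mpr hm))

-- ===== VERDICT (by name: the statement is the Claim_ definition above) =====
theorem hitung_spec : Claim_equal_hitung := by
  intro list_a list_b a_dict _
  unfold Spec_hitung hitung hitung_alt
  simp only []
  set adict := PySem.Dict.ofList a_dict with hadict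
  set r := adict.items.foldl (fun d kv => d.insert kv.2 kv.1) PySem.Dict.empty with hr
  have hrnd : r.keys.Nodup := by
    rw [hr]
    exact PySem.Dict.nodup_keys_foldl_insert_key adict.items (fun kv => kv.2)
      (fun _ kv => kv.1) PySem.Dict.empty PySem.Dict.nodup_keys_empty
  set g : String → Int := fun e => if e ∈ r.keys then r.getD e 0 else 0 with hg
  set sa := PySem.Set.ofList list_a with hsa
  set sb := PySem.Set.ofList list_b with hsb
  have hna : sa.Nodup := PySem.Set.nodup_ofList list_a
  have hnb : sb.Nodup := PySem.Set.nodup_ofList list_b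
  -- the three A-side pieces and the three B-side pieces as mapped sums
  have hA1 : pvCalculate (PySem.Set.inter sa sb) r = ((PySem.Set.inter sa sb).map g).sum :=
    pvCalculate_eq_sum _ r hrnd
  have hA2 : pvCalculate (PySem.Set.diff sa sb) r = ((PySem.Set.diff sa sb).map g).sum :=
    pvCalculate_eq_sum _ r hrnd
  have hA3 : pvCalculate (PySem.Set.diff sb sa) r = ((PySem.Set.diff sb sa).map g).sum :=
    pvCalculate_eq_sum _ r hrnd
  have hB1 : pvLookSum sa r = (sa.map g).sum := pvLookSum_eq_sum sa r
  have hB2 : pvLookSum sb r = (sb.map g).sum := pvLookSum_eq_sum sb r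
  have hB3 : pvLookSum (PySem.Set.inter sa sb) r = ((PySem.Set.inter sa sb).map g).sum :=
    pvLookSum_eq_sum _ r
  -- ja = ni + a_diff_b
  have hsplit_a : (sa.map g).sum
      = ((PySem.Set.inter sa sb).map g).sum + ((PySem.Set.diff sa sb).map g).sum := by
    have := sum_filter_split sa (fun x => PySem.Set.contains sb x) g
    simpa [PySem.Set.inter, PySem.Set.diff] using this
  -- jb = ni + b_diff_a (via inter sb sa)
  have hsplit_b : (sb.map g).sum
      = ((PySem.Set.inter sa sb).map g).sum + ((PySem.Set.diff sb sa).map g).sum := by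
    have h1 := sum_filter_split sb (fun x => PySem.Set.contains sa x) g
    have h2 : ((PySem.Set.inter sb sa).map g).sum = ((PySem.Set.inter sa sb).map g).sum := by
      apply sum_perm_of_mem_iff
      · exact List.Nodup.filter _ hnb
      · exact List.Nodup.filter _ hna
      · intro x
        simp [PySem.Set.inter, PySem.Set.contains, List.mem_filter, and_comm]
    rw [← h2]
    simpa [PySem.Set.inter, PySem.Set.diff] using h1
  rw [hA1, hA2, hA3, hB1, hB2, hB3, hsplit_a, hsplit_b]
  simp only [List.cons.injEq]
  and_intros <;> first | ring | trivial
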